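-- pv_equiv track=rewrite | github.com/MotelPaso/Prog-UCN | Clases/Clase 8/C8_03.py | Repeticiones
-- ===== SOURCE A (Python) =====
-- def Repeticiones(lista,listaUnicos):
--     contadores = []
--     for i in range(len(listaUnicos)):
--         contadores.append(0) # Creamos una lista de contadores pensando en el numero de nombres unicos
--
--     for i in range(len(listaUnicos)): # Por cada nombre unico en el archivo
--         nombre = lista[i] # Guardamos un nombre para comparar
--         for j in range(i,len(lista)): # Revisamos la lista completa de nombres
--             if nombre == lista[j]: # Si el nombre revisado es igual al nombre guardado
--                 contadores[i] += 1 # Le sumamos uno a su contador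
--     return contadores # Devolvemos el contador
-- ===== SOURCE B (Python) =====
-- def Repeticiones(lista, listaUnicos):
--     # one right-to-left pass: counts[i] = occurrences of lista[i] in lista[i:]
--     seen = {}
--     counts = [0] * len(lista)
--     for i in range(len(lista) - 1, -1, -1):
--         name = lista[i]
--         c = seen.get(name, 0) + 1
--         seen[name] = c
--         counts[i] = c
--     return counts[:len(listaUnicos)]
-- ===== Notes on version B (the rewrite author's own statement) =====
-- stated objective: faster
-- what changed: Replaces the quadratic nested scan (for each of the first len(listaUnicos) positions, rescan the rest of lista) by a single right-to-left pass over lista with a dictionary of suffix counts, then takes the first len(listaUnicos) entries.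
import Mathlib
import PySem

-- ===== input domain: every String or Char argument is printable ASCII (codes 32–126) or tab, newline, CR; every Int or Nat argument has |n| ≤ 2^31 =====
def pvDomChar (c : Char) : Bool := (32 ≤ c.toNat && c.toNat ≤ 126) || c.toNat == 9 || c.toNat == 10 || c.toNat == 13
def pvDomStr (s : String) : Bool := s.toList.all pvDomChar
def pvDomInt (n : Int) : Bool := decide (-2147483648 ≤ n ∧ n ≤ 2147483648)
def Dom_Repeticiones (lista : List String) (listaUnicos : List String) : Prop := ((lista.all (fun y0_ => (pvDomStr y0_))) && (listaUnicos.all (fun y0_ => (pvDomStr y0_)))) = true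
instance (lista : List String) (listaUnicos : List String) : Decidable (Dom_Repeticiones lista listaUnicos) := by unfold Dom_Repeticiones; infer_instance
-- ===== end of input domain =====

-- B replaces A's O(m*n) nested rescans by one right-to-left pass with a dict of suffix counts (asymptotically faster).

-- ===== PORT A =====
def Repeticiones (lista : List String) (listaUnicos : List String) : List Int :=
  let contadores : List Int :=
    (PySem.List.pyRange 0 (listaUnicos.length : Int) 1).foldl (fun acc _ => acc ++ [(0 : Int)]) []
  (PySem.List.pyRange 0 (listaUnicos.length : Int) 1).foldl (fun cont i =>
    let nombre := PySem.List.pyGetD lista i ""   -- lista[i]; in range on Pre_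
    (PySem.List.pyRange i (lista.length : Int) 1).foldl (fun c j =>
      if nombre == PySem.List.pyGetD lista j "" then
        c.set i.toNat (c.getD i.toNat 0 + 1)     -- contadores[i] += 1
      else c) cont) contadores

-- ===== PORT B =====
-- right-to-left pass (Python's loop i = n-1 .. 0) as structural recursion from the tail:
-- returns (suffix counts for every position, dict of counts of the processed suffix)
def pvSufGo : List String → List Int × PySem.Dict String Int
  | [] => ([], PySem.Dict.empty)
  | x :: rest =>
    let p := pvSufGo rest
    let c := p.2.getD x 0 + 1
    (c :: p.1, p.2.insert x c)

def Repeticiones_alt (lista : List String) (listaUnicos : List String) : List Int :=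
  (pvSufGo lista).1.take listaUnicos.length

-- ===== PRECONDITION & SPEC =====
-- A indexes lista[i] for i < len(listaUnicos) and raises IndexError when listaUnicos is longer than lista.
def Pre_Repeticiones (lista : List String) (listaUnicos : List String) : Prop :=
  listaUnicos.length ≤ lista.length
instance (lista : List String) (listaUnicos : List String) : Decidable (Pre_Repeticiones lista listaUnicos) := by unfold Pre_Repeticiones; infer_instance

def pvWitness_Repeticiones : List String × List String := (["ana", "ben", "ana"], ["ana", "ben"])

def Spec_Repeticiones (lista : List String) (listaUnicos : List String) (out : List Int) : Prop := out = Repeticiones_alt lista listaUnicos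
instance (lista : List String) (listaUnicos : List String) (out : List Int) : Decidable (Spec_Repeticiones lista listaUnicos out) := by unfold Spec_Repeticiones; infer_instance

-- ===== CLAIM (what is proved, stated in full; the proofs are below) =====
def Claim_equal_Repeticiones : Prop := ∀ (lista : List String) (listaUnicos : List String), Dom_Repeticiones lista listaUnicos → Pre_Repeticiones lista listaUnicos → Spec_Repeticiones lista listaUnicos (Repeticiones lista listaUnicos)

-- ===== LEMMAS AND PROOFS =====

-- count of the element at position t within the suffix of l starting at t
def pvCnt (l : List String) (t : Nat) : Int := ((l.drop t).count (l.getD t "") : Int)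

-- A's first loop builds a list of zeros
theorem pv_zeros (js : List Int) (init : List Int) :
    js.foldl (fun acc _ => acc ++ [(0 : Int)]) init = init ++ List.replicate js.length 0 := by
  induction js generalizing init with
  | nil => simp
  | cons j js ih =>
    simp only [List.foldl_cons, ih, List.length_cons, List.append_assoc,
      List.singleton_append, ← List.replicate_succ]

-- A's inner loop: adds the number of matches to slot t
theorem pv_inner (P : Int → Bool) (js : List Int) (c : List Int) (t : Nat) (ht : t < c.length) :
    js.foldl (fun c j => if P j then c.set t (c.getD t 0 + 1) else c) c
      = c.set t (c.getD t 0 + (js.countP P : Int)) := by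
  induction js generalizing c with
  | nil =>
    simp only [List.foldl_nil, List.countP_nil, Int.natCast_zero, add_zero]
    rw [List.getD_eq_getElem c 0 ht, List.set_getElem_self]
  | cons j js ih =>
    simp only [List.foldl_cons, List.countP_cons]
    by_cases hP : P j
    · have hlen : t < (c.set t (c.getD t 0 + 1)).length := by simpa using ht
      rw [if_pos hP, ih _ hlen, List.getD_eq_getElem _ 0 hlen, List.getElem_set_self,
        List.set_set, List.getD_eq_getElem c 0 ht]
      congr 1
      simp only [hP, if_true]
      push_cast
      ring
    · rw [if_neg hP, ih _ ht]
      simp only [hP, Bool.false_eq_true, if_false, Nat.add_zero]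

-- the number of matches the inner range scan sees is a suffix count
theorem pv_count (lista : List String) (nombre : String) (i : Int) (h0 : 0 ≤ i) :
    (PySem.List.pyRange i (lista.length : Int) 1).countP
        (fun j => nombre == PySem.List.pyGetD lista j "")
      = (lista.drop i.toNat).count nombre := by
  have hmap := PySem.List.map_pyGetD_pyRange' (xs := lista) (d := "") (a := i) h0
  calc (PySem.List.pyRange i (lista.length : Int) 1).countP
          (fun j => nombre == PySem.List.pyGetD lista j "")
      = ((PySem.List.pyRange i (lista.length : Int) 1).map
          (fun j => PySem.List.pyGetD lista j "")).countP (fun s => nombre == s) := by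
        rw [List.countP_map]; rfl
    _ = (lista.drop i.toNat).countP (fun s => nombre == s) := by rw [hmap]
    _ = (lista.drop i.toNat).count nombre := by
        unfold List.count
        exact List.countP_congr (fun x _ => by simp only [beq_iff_eq]; exact eq_comm)

-- A's outer loop, from index k on, fills slots k..m-1 with the suffix counts
theorem pv_outer (lista : List String) (m : Nat) (hmn : m ≤ lista.length) :
    ∀ d k : Nat, m - k = d → k ≤ m →
    (PySem.List.pyRange (k : Int) (m : Int) 1).foldl
      (fun cont i =>
        let nombre := PySem.List.pyGetD lista i ""
        (PySem.List.pyRange i (lista.length : Int) 1).foldl (fun c j =>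
          if nombre == PySem.List.pyGetD lista j "" then
            c.set i.toNat (c.getD i.toNat 0 + 1)
          else c) cont)
      ((List.range m).map (fun t => if t < k then pvCnt lista t else 0))
    = (List.range m).map (pvCnt lista) := by
  intro d
  induction d with
  | zero =>
    intro k hd hk
    have hkm : k = m := by omega
    subst hkm
    rw [PySem.List.pyRange_one_eq_nil (le_refl _), List.foldl_nil]
    apply List.map_congr_left
    intro t ht
    simp [List.mem_range.mp ht]
  | succ d ih =>
    intro k hd hk
    have hkm : k < m := by omega
    have hcons : PySem.List.pyRange (k : Int) (m : Int) 1
        = (k : Int) :: PySem.List.pyRange ((k : Int) + 1) (m : Int) 1 :=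
      PySem.List.pyRange_one_cons (by exact_mod_cast hkm)
    rw [hcons, List.foldl_cons]
    -- evaluate one step of the outer loop at i = k
    have hlenA : k < ((List.range m).map (fun t => if t < k then pvCnt lista t else 0)).length := by
      simpa using hkm
    have hstep :
        (let nombre := PySem.List.pyGetD lista (k : Int) ""
         (PySem.List.pyRange (k : Int) (lista.length : Int) 1).foldl (fun c j =>
            if nombre == PySem.List.pyGetD lista j "" then
              c.set (k : Int).toNat (c.getD (k : Int).toNat 0 + 1)
            else c)
          ((List.range m).map (fun t => if t < k then pvCnt lista t else 0)))
        = (List.range m).map (fun t => if t < k + 1 then pvCnt lista t else 0) := by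
      show (PySem.List.pyRange (k : Int) (lista.length : Int) 1).foldl _ _ = _
      rw [pv_inner _ _ _ _ (by simpa using hlenA)]
      rw [pv_count lista _ (k : Int) (by positivity)]
      have hgd : ((List.range m).map (fun t => if t < k then pvCnt lista t else 0)).getD
          (k : Int).toNat 0 = 0 := by
        rw [List.getD_eq_getElem _ 0 (by simpa using hlenA)]
        simp
      rw [hgd, zero_add]
      apply List.ext_getElem
      · simp
      · intro j h1 h2
        have hj : j < m := by simpa using h2
        rw [List.getElem_set]
        by_cases hjk : (k : Int).toNat = j
        · have : j = k := by omega
          subst this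
          simp [pvCnt, PySem.List.pyGetD_natCast]
        · have hjk' : j ≠ k := by omega
          simp only [List.getElem_map, List.getElem_range]
          split_ifs with h3 h4 <;> first | rfl | omega
    rw [hstep]
    have : ((k : Int) + 1) = ((k + 1 : Nat) : Int) := by push_cast; ring
    rw [this]
    exact ih (k + 1) (by omega) (by omega)

-- A computes the map of suffix counts over range m
theorem pv_A (lista listaUnicos : List String) (h : listaUnicos.length ≤ lista.length) :
    Repeticiones lista listaUnicos = (List.range listaUnicos.length).map (pvCnt lista) := by
  unfold Repeticiones
  rw [pv_zeros]
  have hz : ([] : List Int) ++ List.replicate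
        (PySem.List.pyRange 0 (listaUnicos.length : Int) 1).length 0
      = (List.range listaUnicos.length).map (fun t => if t < 0 then pvCnt lista t else 0) := by
    simp
  rw [hz]
  have := pv_outer lista listaUnicos.length h (listaUnicos.length - 0) 0 rfl (by omega)
  simpa using this

-- B's dict holds the counts of the processed suffix
theorem pv_go_dict (l : List String) (x : String) :
    (pvSufGo l).2.getD x 0 = (l.count x : Int) := by
  induction l with
  | nil => simp [pvSufGo]
  | cons y rest ih =>
    simp only [pvSufGo, PySem.Dict.getD_insert, List.count_cons]
    by_cases hxy : x = y
    · subst hxy; rw [if_pos rfl, ih]; push_cast; simp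
    · rw [if_neg hxy, ih]
      have : (y == x) = false := by simp [Ne.symm hxy]
      simp [this]

-- B's list is exactly the map of suffix counts over all positions
theorem pv_go_fst (l : List String) :
    (pvSufGo l).1 = (List.range l.length).map (pvCnt l) := by
  induction l with
  | nil => simp [pvSufGo]
  | cons y rest ih =>
    have hhead : pvCnt (y :: rest) 0 = (pvSufGo rest).2.getD y 0 + 1 := by
      rw [pv_go_dict]
      simp only [pvCnt, List.drop_zero, List.getD_cons_zero, List.count_cons_self]
      push_cast; ring
    have htail : List.map (pvCnt (y :: rest) ∘ Nat.succ) (List.range rest.length)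
        = List.map (pvCnt rest) (List.range rest.length) :=
      List.map_congr_left (fun t _ => by simp [pvCnt, Function.comp])
    simp only [pvSufGo, ih, List.length_cons, List.range_succ_eq_map, List.map_cons,
      List.map_map, hhead, htail]

theorem pv_B (lista listaUnicos : List String) (h : listaUnicos.length ≤ lista.length) :
    Repeticiones_alt lista listaUnicos = (List.range listaUnicos.length).map (pvCnt lista) := by
  unfold Repeticiones_alt
  rw [pv_go_fst, ← List.map_take, List.take_range]
  have hmin : min listaUnicos.length lista.length = listaUnicos.length := by omega
  rw [hmin]

-- ===== VERDICT (by name: the statement is the Claim_ definition above) =====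
theorem Repeticiones_spec : Claim_equal_Repeticiones := by
  intro lista listaUnicos _ hpre
  unfold Spec_Repeticiones
  rw [pv_A lista listaUnicos hpre, pv_B lista listaUnicos hpre]
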